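-- pv_equiv track=rewrite | github.com/bvancamp99/CS_540_Intro_to_AI | P3 - N-Queens with a Boulder/nqueens.py | f
-- ===== SOURCE A (Python) =====
-- def f(state, boulderX, boulderY):
--     # store size of board
--     n = len(state)
--
--     # create score var
--     f = 0
--
--     # traverse queens
--     for i in range(n):
--         # check if each queen can attack the current
--         for j in range(n):
--             # skip same queen
--             if j == i:
--                 continue
--
--             # compute bools for row check
--             same_row = state[i] == state[j]
--             impeded = boulderY == state[i] and min(i, j) < boulderX < max(i, j)
--
--             # if queens on same row and not impeded by boulder
--             if same_row and not impeded:
--                 f += 1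
--                 break
--
--             # compute differences for diagonal check
--             col_dif = abs(i - j)
--             row_dif = abs(state[i] - state[j])
--             col_dif_boulder = i - boulderX
--             row_dif_boulder = state[i] - boulderY
--
--             # compute bools for diagonal check
--             same_diag = col_dif == row_dif
--             impeded = col_dif_boulder == row_dif_boulder and min(i, j) < boulderX < max(i, j) and min(state[i], state[j]) < boulderY < max(state[i], state[j])
--
--             # check for diagonal attack
--             if same_diag and not impeded:
--                 f += 1
--                 break
--
--     return f
-- ===== SOURCE B (Python) =====
-- def f(state, boulderX, boulderY):
--     # One pass builds per-line queen counts; the boulder's row and its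
--     # (col-row) diagonal additionally get counts on each side of the boulder.
--     # Each queen is then classified in O(1): O(n) total vs A's O(n^2).
--     n = len(state)
--     rows = {}
--     pdiag = {}
--     adiag = {}
--     for c in range(n):
--         r = state[c]
--         rows[r] = rows.get(r, 0) + 1
--         pdiag[c - r] = pdiag.get(c - r, 0) + 1
--         adiag[c + r] = adiag.get(c + r, 0) + 1
--     db = boulderX - boulderY
--     rleft = sum(1 for c in range(n) if state[c] == boulderY and c <= boulderX)
--     rright = sum(1 for c in range(n) if state[c] == boulderY and c >= boulderX)
--     dleft = sum(1 for c in range(n) if c - state[c] == db and c <= boulderX)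
--     dright = sum(1 for c in range(n) if c - state[c] == db and c >= boulderX)
--     total = 0
--     for c in range(n):
--         r = state[c]
--         if r == boulderY:
--             row_att = (c <= boulderX and rleft >= 2) or (c >= boulderX and rright >= 2)
--         else:
--             row_att = rows[r] >= 2
--         if c - r == db:
--             pd_att = (c <= boulderX and dleft >= 2) or (c >= boulderX and dright >= 2)
--         else:
--             pd_att = pdiag[c - r] >= 2
--         ad_att = adiag[c + r] >= 2
--         if row_att or pd_att or ad_att:
--             total += 1
--     return total
-- ===== Notes on version B (the rewrite author's own statement) =====
-- stated objective: faster
-- what changed: Replaces A's all-pairs double loop (with break) by a single counting pass: per-row and per-diagonal queen-count dictionaries plus side-of-boulder counts on the boulder's row and its col-row diagonal, then classifies each queen in O(1).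
import Mathlib
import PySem

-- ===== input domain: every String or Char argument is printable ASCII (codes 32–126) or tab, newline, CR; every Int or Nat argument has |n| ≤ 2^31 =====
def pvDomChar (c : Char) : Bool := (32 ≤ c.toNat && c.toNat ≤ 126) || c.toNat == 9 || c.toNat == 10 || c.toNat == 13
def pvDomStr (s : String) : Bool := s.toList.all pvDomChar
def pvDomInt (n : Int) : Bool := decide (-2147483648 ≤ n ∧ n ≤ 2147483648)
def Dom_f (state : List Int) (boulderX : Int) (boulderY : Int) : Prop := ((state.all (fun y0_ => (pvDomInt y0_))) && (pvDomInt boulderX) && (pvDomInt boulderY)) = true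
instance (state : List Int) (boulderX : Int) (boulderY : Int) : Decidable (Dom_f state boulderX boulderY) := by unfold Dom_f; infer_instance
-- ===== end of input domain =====

-- B replaces A's all-pairs double loop by one counting pass: per-row / per-diagonal
-- queen counts (plus side-of-boulder counts on the boulder's row and its col−row
-- diagonal), then classifies each queen in O(1); return value only, no mutation.

-- ===== PORT A =====
-- inner 'for j in range(n)' loop of A: true iff it breaks (each break adds 1)
def fInnerA (state : List Int) (boulderX boulderY i : Int) : List Int → Bool
  | [] => false
  | j :: js =>
    if j = i then fInnerA state boulderX boulderY i js
    else
      let si := PySem.List.pyGetD state i 0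
      let sj := PySem.List.pyGetD state j 0
      if si = sj ∧ ¬ (boulderY = si ∧ min i j < boulderX ∧ boulderX < max i j) then true
      else if |i - j| = |si - sj| ∧
          ¬ (i - boulderX = si - boulderY ∧ (min i j < boulderX ∧ boulderX < max i j) ∧
             (min si sj < boulderY ∧ boulderY < max si sj)) then true
      else fInnerA state boulderX boulderY i js

def f (state : List Int) (boulderX : Int) (boulderY : Int) : Int :=
  let n : Int := state.length
  (PySem.List.pyRange 0 n 1).foldl
    (fun acc i =>
      if fInnerA state boulderX boulderY i (PySem.List.pyRange 0 n 1) then acc + 1 else acc) 0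

-- ===== PORT B =====
def f_alt (state : List Int) (boulderX : Int) (boulderY : Int) : Int :=
  let n : Int := state.length
  let idxs := PySem.List.pyRange 0 n 1
  let sAt : Int → Int := fun c => PySem.List.pyGetD state c 0
  let rows := idxs.foldl (fun d c => let r := sAt c; d.insert r (d.getD r 0 + 1))
      (PySem.Dict.empty : PySem.Dict Int Int)
  let pdiag := idxs.foldl (fun d c => let k := c - sAt c; d.insert k (d.getD k 0 + 1))
      (PySem.Dict.empty : PySem.Dict Int Int)
  let adiag := idxs.foldl (fun d c => let k := c + sAt c; d.insert k (d.getD k 0 + 1))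
      (PySem.Dict.empty : PySem.Dict Int Int)
  let db := boulderX - boulderY
  let rleft : Int := idxs.countP (fun c => decide (sAt c = boulderY ∧ c ≤ boulderX))
  let rright : Int := idxs.countP (fun c => decide (sAt c = boulderY ∧ boulderX ≤ c))
  let dleft : Int := idxs.countP (fun c => decide (c - sAt c = db ∧ c ≤ boulderX))
  let dright : Int := idxs.countP (fun c => decide (c - sAt c = db ∧ boulderX ≤ c))
  idxs.foldl
    (fun total c =>
      let r := sAt c
      let row_att : Prop :=
        if r = boulderY then
          (c ≤ boulderX ∧ 2 ≤ rleft) ∨ (boulderX ≤ c ∧ 2 ≤ rright)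
        else 2 ≤ rows.getD r 0
      let pd_att : Prop :=
        if c - r = db then
          (c ≤ boulderX ∧ 2 ≤ dleft) ∨ (boulderX ≤ c ∧ 2 ≤ dright)
        else 2 ≤ pdiag.getD (c - r) 0
      let ad_att : Prop := 2 ≤ adiag.getD (c + r) 0
      if row_att ∨ pd_att ∨ ad_att then total + 1 else total) 0

-- ===== PRECONDITION & SPEC =====
def Spec_f (state : List Int) (boulderX : Int) (boulderY : Int) (out : Int) : Prop := out = f_alt state boulderX boulderY
instance (state : List Int) (boulderX : Int) (boulderY : Int) (out : Int) : Decidable (Spec_f state boulderX boulderY out) := by unfold Spec_f; infer_instance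

-- ===== CLAIM (what is proved, stated in full; the proofs are below) =====
def Claim_equal_f : Prop := ∀ (state : List Int) (boulderX : Int) (boulderY : Int), Dom_f state boulderX boulderY → Spec_f state boulderX boulderY (f state boulderX boulderY)

-- ===== LEMMAS AND PROOFS =====

-- a nodup list containing an element i satisfying p has countP ≥ 2 iff some OTHER element satisfies p
theorem two_le_countP_iff (l : List Int) (p : Int → Bool) (i : Int)
    (hnd : l.Nodup) (hi : i ∈ l) (hpi : p i = true) :
    2 ≤ l.countP p ↔ ∃ j ∈ l, j ≠ i ∧ p j = true := by
  rw [List.countP_eq_length_filter]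
  have hfi : i ∈ l.filter p := List.mem_filter.mpr ⟨hi, hpi⟩
  have hfn : (l.filter p).Nodup := hnd.filter p
  constructor
  · intro h2
    by_contra hno
    simp only [not_exists, not_and] at hno
    have hall : ∀ j ∈ l.filter p, j = i := by
      intro j hj
      rcases List.mem_filter.mp hj with ⟨hjl, hjp⟩
      by_contra hne
      exact (hno j hjl hne) hjp
    have h1 := List.nodup_iff_count_le_one.mp hfn i
    have hcl : List.count i (l.filter p) = (l.filter p).length :=
      List.count_eq_length.mpr (fun a ha => by simp [hall a ha])
    omega
  · rintro ⟨j, hjl, hjne, hjp⟩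
    have hfj : j ∈ l.filter p := List.mem_filter.mpr ⟨hjl, hjp⟩
    have h2 : j ∈ (l.filter p).erase i := (List.Nodup.mem_erase_iff hfn).mpr ⟨hjne, hfj⟩
    have h3 := List.length_pos_of_mem h2
    have h4 := List.length_erase_of_mem hfi
    omega

-- Int-valued version matching the ports (2 ≤ cast count)
theorem two_le_countP_int_iff (l : List Int) (p : Int → Bool) (i : Int)
    (hnd : l.Nodup) (hi : i ∈ l) (hpi : p i = true) :
    (2 : Int) ≤ (l.countP p : Int) ↔ ∃ j ∈ l, j ≠ i ∧ p j = true := by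
  rw [← two_le_countP_iff l p i hnd hi hpi]
  exact_mod_cast Iff.rfl

-- a line that the boulder splits: another queen attacks i iff both lie weakly on one side
theorem segment_count_iff (R : List Int) (K : Int → Prop) [DecidablePred K]
    (i bx : Int) (hnd : R.Nodup) (hi : i ∈ R) (hKi : K i) :
    (∃ j ∈ R, j ≠ i ∧ (K j ∧ ((i ≤ bx ∧ j ≤ bx) ∨ (bx ≤ i ∧ bx ≤ j)))) ↔
    ((i ≤ bx ∧ (2:Int) ≤ (R.countP (fun c => decide (K c ∧ c ≤ bx)) : Int)) ∨
     (bx ≤ i ∧ (2:Int) ≤ (R.countP (fun c => decide (K c ∧ bx ≤ c)) : Int))) := by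
  constructor
  · rintro ⟨j, hjR, hjne, hK, (⟨h1, h2⟩ | ⟨h1, h2⟩)⟩
    · exact Or.inl ⟨h1, (two_le_countP_int_iff R _ i hnd hi (by simp [hKi, h1])).mpr
        ⟨j, hjR, hjne, by simp [hK, h2]⟩⟩
    · exact Or.inr ⟨h1, (two_le_countP_int_iff R _ i hnd hi (by simp [hKi, h1])).mpr
        ⟨j, hjR, hjne, by simp [hK, h2]⟩⟩
  · rintro (⟨h1, h2⟩ | ⟨h1, h2⟩)
    · rcases (two_le_countP_int_iff R _ i hnd hi (by simp [hKi, h1])).mp h2 with ⟨j, hjR, hjne, hp⟩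
      simp only [decide_eq_true_eq] at hp
      exact ⟨j, hjR, hjne, hp.1, Or.inl ⟨h1, hp.2⟩⟩
    · rcases (two_le_countP_int_iff R _ i hnd hi (by simp [hKi, h1])).mp h2 with ⟨j, hjR, hjne, hp⟩
      simp only [decide_eq_true_eq] at hp
      exact ⟨j, hjR, hjne, hp.1, Or.inr ⟨h1, hp.2⟩⟩

-- pointwise: row-attack condition when the boulder is on i's row
theorem row_pt (i j si sj bx by_ : Int) (h : si = by_) :
    (si = sj ∧ ¬(by_ = si ∧ min i j < bx ∧ bx < max i j)) ↔
    (sj = by_ ∧ ((i ≤ bx ∧ j ≤ bx) ∨ (bx ≤ i ∧ bx ≤ j))) := by omega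

-- pointwise: diagonal-attack condition split into the two diagonal directions;
-- a boulder never blocks an anti-diagonal pair in A's test
theorem diag_pt (i j si sj bx by_ : Int) (_hne : j ≠ i) :
    (|i - j| = |si - sj| ∧ ¬(i - bx = si - by_ ∧ (min i j < bx ∧ bx < max i j) ∧
        (min si sj < by_ ∧ by_ < max si sj))) ↔
    ((j - sj = i - si ∧ (¬(i - si = bx - by_) ∨ ((i ≤ bx ∧ j ≤ bx) ∨ (bx ≤ i ∧ bx ≤ j)))) ∨
     (j + sj = i + si)) := by
  rw [abs_eq_abs]; omega

-- A's inner loop is an existence test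
theorem fInnerA_eq_any (state : List Int) (bx by_ i : Int) (l : List Int) :
    fInnerA state bx by_ i l = l.any (fun j => decide (j ≠ i ∧
      ((PySem.List.pyGetD state i 0 = PySem.List.pyGetD state j 0 ∧
        ¬(by_ = PySem.List.pyGetD state i 0 ∧ min i j < bx ∧ bx < max i j)) ∨
       (|i - j| = |PySem.List.pyGetD state i 0 - PySem.List.pyGetD state j 0| ∧
        ¬(i - bx = PySem.List.pyGetD state i 0 - by_ ∧ (min i j < bx ∧ bx < max i j) ∧
          (min (PySem.List.pyGetD state i 0) (PySem.List.pyGetD state j 0) < by_ ∧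
           by_ < max (PySem.List.pyGetD state i 0) (PySem.List.pyGetD state j 0))))))) := by
  induction l with
  | nil => rfl
  | cons j js ih =>
    simp only [fInnerA, List.any_cons]
    split_ifs with hji h1 h2
    · subst hji
      simp [ih]
    · rw [decide_eq_true ⟨hji, Or.inl h1⟩]
      simp
    · rw [decide_eq_true ⟨hji, Or.inr h2⟩]
      simp
    · rw [decide_eq_false (fun h => (h.2).elim h1 h2)]
      simp [ih]

-- counter-building loop keyed by (key c): dict lookup is a countP
theorem getD_keycount (key : Int → Int) (l : List Int) (v : Int) :
    ((l.foldl (fun d c => d.insert (key c) (d.getD (key c) 0 + 1))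
        (PySem.Dict.empty : PySem.Dict Int Int)).getD v 0)
    = (l.countP (fun c => key c == v) : Int) := by
  have hm : List.foldl (fun (d : PySem.Dict Int Int) c => d.insert (key c) (d.getD (key c) 0 + 1))
      PySem.Dict.empty l
      = List.foldl (fun (d : PySem.Dict Int Int) x => d.insert x (d.getD x 0 + 1))
        PySem.Dict.empty (l.map key) := by rw [List.foldl_map]
  rw [hm, PySem.Dict.getD_foldl_insert_add_one, PySem.Dict.getD_empty,
    List.count, List.countP_map]
  simp only [zero_add]
  exact congrArg _ (List.countP_congr (fun x _ => Iff.rfl))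

-- the heart: queen i is attacked by some other queen iff B's O(1) classification holds
theorem exists_attack_iff (s : Int → Int) (n bx by_ i : Int)
    (hi : i ∈ PySem.List.pyRange 0 n 1) :
    (∃ j ∈ PySem.List.pyRange 0 n 1, j ≠ i ∧
      ((s i = s j ∧ ¬(by_ = s i ∧ min i j < bx ∧ bx < max i j)) ∨
       (|i - j| = |s i - s j| ∧ ¬(i - bx = s i - by_ ∧ (min i j < bx ∧ bx < max i j) ∧
          (min (s i) (s j) < by_ ∧ by_ < max (s i) (s j))))))
    ↔ ((if s i = by_ then
          (i ≤ bx ∧ (2:Int) ≤ ((PySem.List.pyRange 0 n 1).countP (fun c => decide (s c = by_ ∧ c ≤ bx)) : Int)) ∨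
          (bx ≤ i ∧ (2:Int) ≤ ((PySem.List.pyRange 0 n 1).countP (fun c => decide (s c = by_ ∧ bx ≤ c)) : Int))
        else (2:Int) ≤ ((PySem.List.pyRange 0 n 1).countP (fun c => s c == s i) : Int)) ∨
       ((if i - s i = bx - by_ then
          (i ≤ bx ∧ (2:Int) ≤ ((PySem.List.pyRange 0 n 1).countP (fun c => decide (c - s c = bx - by_ ∧ c ≤ bx)) : Int)) ∨
          (bx ≤ i ∧ (2:Int) ≤ ((PySem.List.pyRange 0 n 1).countP (fun c => decide (c - s c = bx - by_ ∧ bx ≤ c)) : Int))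
        else (2:Int) ≤ ((PySem.List.pyRange 0 n 1).countP (fun c => c - s c == i - s i) : Int)) ∨
       (2:Int) ≤ ((PySem.List.pyRange 0 n 1).countP (fun c => c + s c == i + s i) : Int))) := by
  have hnd := PySem.List.nodup_pyRange_one (a := 0) (b := n)
  set R := PySem.List.pyRange 0 n 1 with hR
  -- split the existential into row / +diag / anti-diag parts
  have hsplit : (∃ j ∈ R, j ≠ i ∧
      ((s i = s j ∧ ¬(by_ = s i ∧ min i j < bx ∧ bx < max i j)) ∨
       (|i - j| = |s i - s j| ∧ ¬(i - bx = s i - by_ ∧ (min i j < bx ∧ bx < max i j) ∧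
          (min (s i) (s j) < by_ ∧ by_ < max (s i) (s j)))))) ↔
      ((∃ j ∈ R, j ≠ i ∧ (s i = s j ∧ ¬(by_ = s i ∧ min i j < bx ∧ bx < max i j))) ∨
       ((∃ j ∈ R, j ≠ i ∧ (j - s j = i - s i ∧ (¬(i - s i = bx - by_) ∨ ((i ≤ bx ∧ j ≤ bx) ∨ (bx ≤ i ∧ bx ≤ j))))) ∨
        (∃ j ∈ R, j ≠ i ∧ j + s j = i + s i))) := by
    constructor
    · rintro ⟨j, hj, hne, (hrow | hdiag)⟩
      · exact Or.inl ⟨j, hj, hne, hrow⟩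
      · rcases (diag_pt i j (s i) (s j) bx by_ hne).mp hdiag with h | h
        · exact Or.inr (Or.inl ⟨j, hj, hne, h⟩)
        · exact Or.inr (Or.inr ⟨j, hj, hne, h⟩)
    · rintro (⟨j, hj, hne, hrow⟩ | ⟨j, hj, hne, h⟩ | ⟨j, hj, hne, h⟩)
      · exact ⟨j, hj, hne, Or.inl hrow⟩
      · exact ⟨j, hj, hne, Or.inr ((diag_pt i j (s i) (s j) bx by_ hne).mpr (Or.inl h))⟩
      · exact ⟨j, hj, hne, Or.inr ((diag_pt i j (s i) (s j) bx by_ hne).mpr (Or.inr h))⟩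
  rw [hsplit]
  -- row part
  have hrow : (∃ j ∈ R, j ≠ i ∧ (s i = s j ∧ ¬(by_ = s i ∧ min i j < bx ∧ bx < max i j))) ↔
      (if s i = by_ then
        (i ≤ bx ∧ (2:Int) ≤ (R.countP (fun c => decide (s c = by_ ∧ c ≤ bx)) : Int)) ∨
        (bx ≤ i ∧ (2:Int) ≤ (R.countP (fun c => decide (s c = by_ ∧ bx ≤ c)) : Int))
      else (2:Int) ≤ (R.countP (fun c => s c == s i) : Int)) := by
    by_cases h : s i = by_
    · rw [if_pos h]
      have hpt : (∃ j ∈ R, j ≠ i ∧ (s i = s j ∧ ¬(by_ = s i ∧ min i j < bx ∧ bx < max i j))) ↔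
          (∃ j ∈ R, j ≠ i ∧ ((s j = by_) ∧ ((i ≤ bx ∧ j ≤ bx) ∨ (bx ≤ i ∧ bx ≤ j)))) := by
        apply exists_congr; intro j
        exact and_congr_right fun _ => and_congr_right fun _ => row_pt i j (s i) (s j) bx by_ h
      rw [hpt]
      exact segment_count_iff R (fun c => s c = by_) i bx hnd hi h
    · rw [if_neg h]
      rw [two_le_countP_int_iff R _ i hnd hi (by simp)]
      apply exists_congr; intro j
      refine and_congr_right fun _ => and_congr_right fun _ => ?_
      rw [beq_iff_eq]
      constructor
      · rintro ⟨he, _⟩; exact he.symm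
      · intro he; exact ⟨he.symm, fun hc => h hc.1.symm⟩
  -- +diagonal part
  have hpd : (∃ j ∈ R, j ≠ i ∧ (j - s j = i - s i ∧ (¬(i - s i = bx - by_) ∨ ((i ≤ bx ∧ j ≤ bx) ∨ (bx ≤ i ∧ bx ≤ j))))) ↔
      (if i - s i = bx - by_ then
        (i ≤ bx ∧ (2:Int) ≤ (R.countP (fun c => decide (c - s c = bx - by_ ∧ c ≤ bx)) : Int)) ∨
        (bx ≤ i ∧ (2:Int) ≤ (R.countP (fun c => decide (c - s c = bx - by_ ∧ bx ≤ c)) : Int))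
      else (2:Int) ≤ (R.countP (fun c => c - s c == i - s i) : Int)) := by
    by_cases h : i - s i = bx - by_
    · rw [if_pos h]
      have hpt : (∃ j ∈ R, j ≠ i ∧ (j - s j = i - s i ∧ (¬(i - s i = bx - by_) ∨ ((i ≤ bx ∧ j ≤ bx) ∨ (bx ≤ i ∧ bx ≤ j))))) ↔
          (∃ j ∈ R, j ≠ i ∧ ((j - s j = bx - by_) ∧ ((i ≤ bx ∧ j ≤ bx) ∨ (bx ≤ i ∧ bx ≤ j)))) := by
        apply exists_congr; intro j
        refine and_congr_right fun _ => and_congr_right fun _ => ?_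
        omega
      rw [hpt]
      exact segment_count_iff R (fun c => c - s c = bx - by_) i bx hnd hi h
    · rw [if_neg h]
      rw [two_le_countP_int_iff R _ i hnd hi (by simp)]
      apply exists_congr; intro j
      refine and_congr_right fun _ => and_congr_right fun _ => ?_
      rw [beq_iff_eq]
      constructor
      · rintro ⟨he, _⟩; exact he
      · intro he; exact ⟨he, Or.inl h⟩
  -- anti-diagonal part
  have had : (∃ j ∈ R, j ≠ i ∧ j + s j = i + s i) ↔
      (2:Int) ≤ (R.countP (fun c => c + s c == i + s i) : Int) := by
    rw [two_le_countP_int_iff R _ i hnd hi (by simp)]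
    apply exists_congr; intro j
    simp
  rw [hrow, hpd, had]

-- ===== VERDICT (by name: the statement is the Claim_ definition above) =====
theorem f_spec : Claim_equal_f := by
  intro state bx by_ _
  unfold Spec_f f f_alt
  simp only [getD_keycount (fun j => PySem.List.pyGetD state j 0),
    getD_keycount (fun j => j - PySem.List.pyGetD state j 0),
    getD_keycount (fun j => j + PySem.List.pyGetD state j 0)]
  rw [PySem.List.foldl_if_add_one, PySem.List.foldl_ite_add_one]
  refine congrArg _ (congrArg _ (List.countP_congr ?_))
  intro c hc
  rw [fInnerA_eq_any]
  simp only [List.any_eq_true, decide_eq_true_eq]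
  exact exists_attack_iff (fun j => PySem.List.pyGetD state j 0) state.length bx by_ c hc
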